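-- pv_equiv track=rewrite | github.com/apeace/governor | training.py | dice_to_input
-- ===== SOURCE A (Python) =====
-- from typing import List, Dict
--
-- def dice_to_input(die: int) -> List[int]:
--     input: List[int] = []
--     for i in range(0, 6):
--         if i+1 == die:
--             input.append(1)
--         else:
--             input.append(0)
--     assert len(input) == 6
--     assert len([d for d in input if input == 1]) <= 1
--     return input
-- ===== SOURCE B (Python) =====
-- from typing import List
--
-- def dice_to_input(die: int) -> List[int]:
--     result: List[int] = [0] * 6
--     if 1 <= die <= 6:
--         result[die - 1] = 1
--     return result
-- ===== Notes on version B (the rewrite author's own statement) =====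
-- stated objective: simpler
-- what changed: B builds a zero vector and, when die is a valid face, writes the single one directly at the computed index instead of scanning every slot with a comparison.
import Mathlib
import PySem

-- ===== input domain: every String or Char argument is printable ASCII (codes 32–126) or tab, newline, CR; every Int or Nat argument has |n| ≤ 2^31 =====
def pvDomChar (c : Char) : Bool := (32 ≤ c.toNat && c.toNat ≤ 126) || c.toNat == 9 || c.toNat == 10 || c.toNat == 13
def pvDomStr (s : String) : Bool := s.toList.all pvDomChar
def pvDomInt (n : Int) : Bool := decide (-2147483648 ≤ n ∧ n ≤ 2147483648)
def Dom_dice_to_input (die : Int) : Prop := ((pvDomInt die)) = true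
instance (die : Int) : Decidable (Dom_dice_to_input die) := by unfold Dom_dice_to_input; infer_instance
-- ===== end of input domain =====

-- ===== PORT A =====
-- Port of A: loop over range(0,6), appending 1 when i+1 == die else 0.
def dice_to_input (die : Int) : List Int :=
  (PySem.List.pyRange 0 6 1).foldl
    (fun input i => if i + 1 == die then input ++ [1] else input ++ [0]) []

-- ===== PORT B =====
-- Port of B: zero vector, then set the one slot when die is a valid face.
def dice_to_input_alt (die : Int) : List Int :=
  let result := List.replicate 6 (0 : Int)
  if 1 ≤ die ∧ die ≤ 6 then result.set (die - 1).toNat 1 else result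

-- ===== PRECONDITION & SPEC =====
def Spec_dice_to_input (die : Int) (out : List Int) : Prop := out = dice_to_input_alt die
instance (die : Int) (out : List Int) : Decidable (Spec_dice_to_input die out) := by unfold Spec_dice_to_input; infer_instance

-- ===== CLAIM (what is proved, stated in full; the proofs are below) =====
def Claim_equal_dice_to_input : Prop := ∀ (die : Int), Dom_dice_to_input die → Spec_dice_to_input die (dice_to_input die)

-- ===== LEMMAS AND PROOFS =====

-- ===== VERDICT (by name: the statement is the Claim_ definition above) =====
theorem dice_to_input_spec : Claim_equal_dice_to_input := by
  intro die _
  unfold Spec_dice_to_input dice_to_input dice_to_input_alt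
  by_cases h : 1 ≤ die ∧ die ≤ 6
  · obtain ⟨h1, h2⟩ := h
    interval_cases die <;> decide
  · rw [if_neg h, show PySem.List.pyRange 0 6 1 = [0, 1, 2, 3, 4, 5] from by decide]
    simp only [List.foldl, beq_iff_eq]
    split_ifs <;> first | rfl | omega
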